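-- pv_equiv track=rewrite | github.com/robpurcell/advent-of-code-2019 | day06.py | get_indirect_orbits
-- ===== SOURCE A (Python) =====
-- def get_indirect_orbits(complete_orbits, start_orbit, orbits=None):
--     if orbits is None:
--         orbits = []
--     direct_orbit = start_orbit.get("direct", None)
--     if direct_orbit is None:
--         return orbits
--     else:
--         orbits.append(direct_orbit)
--         return get_indirect_orbits(complete_orbits, complete_orbits.get(direct_orbit, None), orbits)
-- ===== SOURCE B (Python) =====
-- def get_indirect_orbits(complete_orbits, start_orbit, orbits=None):
--     # Explicit while-loop over parent KEYS instead of A's tail recursion that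
--     # threads the accumulator and passes whole dicts between calls.
--     # (A mutates the caller's `orbits` list in place; B copies it — the proved
--     # equivalence is about the return value only.)
--     out = [] if orbits is None else list(orbits)
--     parent = start_orbit.get("direct")
--     while parent is not None:
--         out.append(parent)
--         parent = complete_orbits.get(parent).get("direct")
--     return out
-- ===== Notes on version B (the rewrite author's own statement) =====
-- stated objective: idiomatic
-- what changed: Replaced A's accumulator-threading tail recursion (which passes whole dicts and mutates/returns the caller's orbits list) by an explicit while-loop that walks parent KEYS and appends to a fresh output list.
import Mathlib
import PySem

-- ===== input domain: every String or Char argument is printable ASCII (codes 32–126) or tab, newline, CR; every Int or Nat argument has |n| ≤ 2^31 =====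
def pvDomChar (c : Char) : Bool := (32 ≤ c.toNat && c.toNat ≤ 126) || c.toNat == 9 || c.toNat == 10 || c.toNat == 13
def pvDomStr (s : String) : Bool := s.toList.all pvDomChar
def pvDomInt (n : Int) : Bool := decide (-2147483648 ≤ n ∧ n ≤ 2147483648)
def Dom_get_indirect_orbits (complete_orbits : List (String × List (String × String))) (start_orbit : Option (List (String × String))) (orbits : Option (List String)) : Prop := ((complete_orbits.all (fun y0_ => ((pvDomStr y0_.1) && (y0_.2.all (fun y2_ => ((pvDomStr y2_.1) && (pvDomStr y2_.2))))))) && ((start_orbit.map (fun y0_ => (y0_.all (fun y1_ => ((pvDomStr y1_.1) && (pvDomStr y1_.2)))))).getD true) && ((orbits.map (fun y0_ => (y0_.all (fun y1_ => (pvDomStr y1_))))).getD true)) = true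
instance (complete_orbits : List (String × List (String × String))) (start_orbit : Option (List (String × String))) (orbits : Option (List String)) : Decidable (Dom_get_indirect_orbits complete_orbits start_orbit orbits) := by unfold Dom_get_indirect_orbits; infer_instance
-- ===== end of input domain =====

-- B replaces A's accumulator-threading tail recursion (which passes whole dicts between
-- calls and mutates/returns the caller's `orbits` list) by an explicit while-loop that
-- walks parent KEYS and appends to a fresh output list (objective: idiomatic). A mutates
-- the caller's `orbits` list in place, B copies it — the equivalence proved here is
-- about the RETURN value only.

-- ===== PORT A =====
-- first-match lookup in a Python dict rendered as an association list (d.get(k, None))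
def pvAGet {α : Type} (l : List (String × α)) (k : String) : Option α :=
  (l.find? (fun p => p.1 == k)).map (·.2)

-- A's recursion, made total with a fuel guard (Pre_ guarantees the fuel,
-- complete_orbits.length + 2, is never exhausted: the walked keys are distinct keys of
-- complete_orbits).
def pvARec (complete_orbits : List (String × List (String × String))) :
    Nat → Option (List (String × String)) → List String → List String
  | 0, _, orbits => orbits
  | _ + 1, none, orbits => orbits      -- Python raises AttributeError here; excluded by Pre_
  | fuel + 1, some start_orbit, orbits =>
    match pvAGet start_orbit "direct" with
    | none => orbits
    | some direct_orbit =>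
      pvARec complete_orbits fuel (pvAGet complete_orbits direct_orbit) (orbits ++ [direct_orbit])

def get_indirect_orbits (complete_orbits : List (String × List (String × String))) (start_orbit : Option (List (String × String))) (orbits : Option (List String)) : List String :=
  pvARec complete_orbits (complete_orbits.length + 2) start_orbit (orbits.getD [])

-- ===== PORT B =====
-- B's while-loop: state is the current parent KEY and the output list; each iteration
-- appends the parent and performs the combined lookup complete_orbits.get(parent).get("direct").
def pvLoop (complete_orbits : List (String × List (String × String))) :
    Nat → String → List String → List String
  | 0, _, out => out
  | fuel + 1, parent, out =>
    let out' := out ++ [parent]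
    match PySem.Dict.get? (PySem.Dict.mk complete_orbits) parent with
    | none => out'                     -- Python raises AttributeError (None.get); excluded by Pre_
    | some node =>
      match PySem.Dict.get? (PySem.Dict.mk node) "direct" with
      | none => out'
      | some p => pvLoop complete_orbits fuel p out'

def get_indirect_orbits_alt (complete_orbits : List (String × List (String × String))) (start_orbit : Option (List (String × String))) (orbits : Option (List String)) : List String :=
  let out := orbits.getD []
  match start_orbit with
  | none => out                        -- Python raises AttributeError here; excluded by Pre_
  | some d =>
    match PySem.Dict.get? (PySem.Dict.mk d) "direct" with
    | none => out
    | some parent => pvLoop complete_orbits (complete_orbits.length + 1) parent out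

-- ===== PRECONDITION & SPEC =====
-- one saturation round: a key is good if its dict's "direct" link is absent or already good
def pvGoodStep (complete_orbits : List (String × List (String × String))) (S : List String) : List String :=
  (complete_orbits.map Prod.fst).filter (fun k =>
    match pvAGet complete_orbits k with
    | none => false
    | some d =>
      match pvAGet d "direct" with
      | none => true
      | some v => S.contains v)

-- the keys on which the ancestor walk is well-founded: the least fixed point of one
-- saturation round, reached after complete_orbits.length rounds
def pvGood (complete_orbits : List (String × List (String × String))) : List String :=
  (pvGoodStep complete_orbits)^[complete_orbits.length] []

-- Pre_ holds EXACTLY where Python A returns normally, and excludes nothing A returns on: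
-- it rules out start_orbit = None (AttributeError), chains whose "direct" link leaves the
-- dict's keys (AttributeError on the next step), and cyclic chains (RecursionError) —
-- i.e. start_orbit is a dict whose "direct" link, if any, lies in the set of keys whose
-- ancestor walk terminates (computed above as a least fixed point, not by rerunning A).
def Pre_get_indirect_orbits (complete_orbits : List (String × List (String × String))) (start_orbit : Option (List (String × String))) (orbits : Option (List String)) : Prop :=
  (match start_orbit with
   | none => false
   | some d =>
     match pvAGet d "direct" with
     | none => true
     | some v => (pvGood complete_orbits).contains v) = true

instance (complete_orbits : List (String × List (String × String))) (start_orbit : Option (List (String × String))) (orbits : Option (List String)) : Decidable (Pre_get_indirect_orbits complete_orbits start_orbit orbits) := by unfold Pre_get_indirect_orbits; infer_instance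

def pvWitness_get_indirect_orbits : (List (String × List (String × String))) × (Option (List (String × String))) × Option (List String) :=
  ([("B", [("direct", "C")]), ("C", [])], some [("direct", "B")], none)

def Spec_get_indirect_orbits (complete_orbits : List (String × List (String × String))) (start_orbit : Option (List (String × String))) (orbits : Option (List String)) (out : List String) : Prop := out = get_indirect_orbits_alt complete_orbits start_orbit orbits
instance (complete_orbits : List (String × List (String × String))) (start_orbit : Option (List (String × String))) (orbits : Option (List String)) (out : List String) : Decidable (Spec_get_indirect_orbits complete_orbits start_orbit orbits out) := by unfold Spec_get_indirect_orbits; infer_instance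

-- ===== CLAIM (what is proved, stated in full; the proofs are below) =====
def Claim_equal_get_indirect_orbits : Prop := ∀ (complete_orbits : List (String × List (String × String))) (start_orbit : Option (List (String × String))) (orbits : Option (List String)), Dom_get_indirect_orbits complete_orbits start_orbit orbits → Pre_get_indirect_orbits complete_orbits start_orbit orbits → Spec_get_indirect_orbits complete_orbits start_orbit orbits (get_indirect_orbits complete_orbits start_orbit orbits)

-- ===== LEMMAS AND PROOFS =====

-- B's Dict.get? on a raw association list is A's first-match lookup
theorem pvDictGet_eq_pvAGet {α : Type} (l : List (String × α)) (k : String) :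
    PySem.Dict.get? (PySem.Dict.mk l) k = pvAGet l k := by
  induction l with
  | nil =>
    show PySem.Dict.get? PySem.Dict.empty k = pvAGet [] k
    simp [PySem.Dict.get?_empty, pvAGet]
  | cons p t ih =>
    obtain ⟨a, b⟩ := p
    rw [PySem.Dict.get?_mk_cons, ih]
    cases hab : (a == k) <;> simp [pvAGet, hab]

-- On a key whose walk terminates within n rounds, B's loop computes what A's recursion
-- computes one call later (any fuel ≥ n on both sides).
theorem pvLoop_eq_pvARec (complete_orbits : List (String × List (String × String))) :
    ∀ (n : Nat) (k : String) (base : List String) (fa fb : Nat),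
      k ∈ (pvGoodStep complete_orbits)^[n] [] → n ≤ fa → n ≤ fb →
      pvLoop complete_orbits fb k base
        = pvARec complete_orbits fa (pvAGet complete_orbits k) (base ++ [k]) := by
  intro n
  induction n with
  | zero => intro k base fa fb hk _ _; simp at hk
  | succ n ih =>
    intro k base fa fb hk hfa hfb
    rw [Function.iterate_succ_apply'] at hk
    set S := (pvGoodStep complete_orbits)^[n] [] with hS
    unfold pvGoodStep at hk
    rw [List.mem_filter] at hk
    obtain ⟨-, hcond⟩ := hk
    obtain ⟨fa, rfl⟩ : ∃ m, fa = m + 1 := ⟨fa - 1, by omega⟩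
    obtain ⟨fb, rfl⟩ : ∃ m, fb = m + 1 := ⟨fb - 1, by omega⟩
    rcases hco : pvAGet complete_orbits k with _ | d
    · simp [hco] at hcond
    · simp only [hco] at hcond
      rcases hd : pvAGet d "direct" with _ | v
      · simp only [pvLoop, pvARec, pvDictGet_eq_pvAGet, hco, hd]
      · simp only [hd] at hcond
        have hv : v ∈ S := by simpa using hcond
        simp only [pvLoop, pvARec, pvDictGet_eq_pvAGet, hco, hd]
        rw [ih v (base ++ [k]) fa fb hv (by omega) (by omega)]

-- ===== VERDICT (by name: the statement is the Claim_ definition above) =====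
theorem get_indirect_orbits_spec : Claim_equal_get_indirect_orbits := by
  intro complete_orbits start_orbit orbits _ hpre
  unfold Pre_get_indirect_orbits at hpre
  unfold Spec_get_indirect_orbits get_indirect_orbits get_indirect_orbits_alt
  rcases start_orbit with _ | d
  · simp at hpre
  · rcases hd : pvAGet d "direct" with _ | v
    · simp only [pvDictGet_eq_pvAGet, hd, pvARec]
    · simp only [hd] at hpre
      simp only [List.contains_eq_mem, decide_eq_true_eq] at hpre
      simp only [pvDictGet_eq_pvAGet, hd, pvARec]
      exact (pvLoop_eq_pvARec complete_orbits complete_orbits.length v (orbits.getD [])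
        (complete_orbits.length + 1) (complete_orbits.length + 1) hpre (by omega) (by omega)).symm
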